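-- pv_equiv track=rewrite | github.com/adam0307a/natural-sorting-algorithm | main.py | sort_by_digit_groups
-- ===== SOURCE A (Python) =====
-- def quicksort(arr):
--     if len(arr) <= 1:
--         return arr
--     pivot = arr[-1]  # Pivot eleman olarak son eleman seçiliyor
--     smaller = [x for x in arr[:-1] if x <= pivot]
--     larger = [x for x in arr[:-1] if x > pivot]
--     return quicksort(smaller) + [pivot] + quicksort(larger)
--
-- def sort_by_digit_groups(numbers):
--     # 1. Gruplandırma
--     groups = {}
--     for number in numbers:
--         digit_count = len(str(number))  # Basamak sayısını hesapla
--         if digit_count not in groups: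
--             groups[digit_count] = []
--         groups[digit_count].append(number)
--
--     # 2. Grupların sıralanması (basamak sayısına göre)
--     sorted_groups = sorted(groups.items())  # (basamak sayısı, grup) çiftlerini sıralar
--
--     # 3. Her grubun quicksort ile sıralanması
--     result = []
--     for _, group in sorted_groups:
--         result.extend(quicksort(group))  # Sıralanan grubu sonuca ekle
--
--     return result
-- ===== SOURCE B (Python) =====
-- def sort_by_digit_groups(numbers):
--     # One single-phase sort keyed by (string length, value) replaces the
--     # grouping dict + per-group quicksort of the original.
--     return sorted(numbers, key=lambda n: (len(str(n)), n))
-- ===== Notes on version B (the rewrite author's own statement) =====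
-- stated objective: faster
-- what changed: Replaced the bucket-by-digit-count dict plus per-bucket hand-written quicksort (last-element pivot, quadratic on duplicate-heavy or sorted buckets) with a single O(n log n) library sort of the whole list keyed by the composite key (len(str(n)), n).
import Mathlib
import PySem

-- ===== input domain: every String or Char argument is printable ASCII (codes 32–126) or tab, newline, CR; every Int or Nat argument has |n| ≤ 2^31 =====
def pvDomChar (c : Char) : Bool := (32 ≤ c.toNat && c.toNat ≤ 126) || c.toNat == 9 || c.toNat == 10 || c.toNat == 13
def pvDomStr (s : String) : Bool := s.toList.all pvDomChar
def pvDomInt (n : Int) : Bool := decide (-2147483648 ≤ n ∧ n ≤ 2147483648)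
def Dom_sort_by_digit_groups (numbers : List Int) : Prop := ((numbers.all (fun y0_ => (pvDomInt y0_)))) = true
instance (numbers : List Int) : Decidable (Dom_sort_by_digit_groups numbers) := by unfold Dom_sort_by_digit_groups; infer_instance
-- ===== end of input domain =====

-- B replaces A's digit-count bucketing dict + per-bucket quicksort by ONE library sort
-- of the whole list under the composite key (len(str(n)), n); measurably faster.


-- len(str(n)) as an Int (shared by both ports, as both Pythons write len(str(...)))
def pvDigits (n : Int) : Int := ((PySem.Int.toChars n).length : Int)

-- ===== PORT A =====
-- quicksort(arr): pivot = arr[-1] (the last element; nonempty since len > 1)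
def pvQuicksort (arr : List Int) : List Int :=
  if h : arr.length ≤ 1 then arr
  else
    let pivot := arr.getLast (by intro hn; rw [hn] at h; simp at h)
    let rest := arr.dropLast            -- arr[:-1]
    pvQuicksort (rest.filter (fun x => decide (x ≤ pivot))) ++ [pivot] ++
      pvQuicksort (rest.filter (fun x => decide (pivot < x)))
termination_by arr.length
decreasing_by
  · have h1 := List.length_filter_le (fun x => decide (x ≤ arr.getLast (by intro hn; rw [hn] at h; simp at h))) arr.dropLast
    have h2 := arr.length_dropLast
    omega
  · have h1 := List.length_filter_le (fun x => decide (arr.getLast (by intro hn; rw [hn] at h; simp at h) < x)) arr.dropLast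
    have h2 := arr.length_dropLast
    omega

def sort_by_digit_groups (numbers : List Int) : List Int :=
  -- 1. grouping into a dict digit_count -> list
  let groups : PySem.Dict Int (List Int) := numbers.foldl (fun d number =>
      let digit_count := pvDigits number
      let d := if d.contains digit_count then d else d.insert digit_count ([] : List Int)
      d.modify digit_count [] (fun g => g ++ [number])) PySem.Dict.empty
  -- 2. sorted(groups.items()) — dict keys are distinct, so Python's tuple comparison
  --    only ever reads the first component; sorting the items by key is exact
  let sorted_groups := PySem.List.sorted groups.items (fun p => p.1)
  -- 3. quicksort each group, extend result
  sorted_groups.foldl (fun result p => result ++ pvQuicksort p.2) []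

-- ===== PORT B =====
def sort_by_digit_groups_alt (numbers : List Int) : List Int :=
  PySem.List.sorted2 numbers (fun n => pvDigits n) (fun n => n)

-- ===== PRECONDITION & SPEC =====
def Spec_sort_by_digit_groups (numbers : List Int) (out : List Int) : Prop := out = sort_by_digit_groups_alt numbers
instance (numbers : List Int) (out : List Int) : Decidable (Spec_sort_by_digit_groups numbers out) := by unfold Spec_sort_by_digit_groups; infer_instance

-- ===== CLAIM (what is proved, stated in full; the proofs are below) =====
def Claim_equal_sort_by_digit_groups : Prop := ∀ (numbers : List Int), Dom_sort_by_digit_groups numbers → Spec_sort_by_digit_groups numbers (sort_by_digit_groups numbers)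

-- ===== LEMMAS AND PROOFS =====

-- the composite "digit-count, then value" order both programs sort by
def pvLe (a b : Int) : Prop := pvDigits a < pvDigits b ∨ (pvDigits a = pvDigits b ∧ a ≤ b)

theorem pvLe_trans {a b c : Int} (h1 : pvLe a b) (h2 : pvLe b c) : pvLe a c := by
  rcases h1 with h1 | ⟨h1, h1'⟩ <;> rcases h2 with h2 | ⟨h2, h2'⟩ <;>
    first
      | exact Or.inl (by omega)
      | exact Or.inr ⟨by omega, le_trans h1' h2'⟩

theorem pvLe_antisymm {a b : Int} (h1 : pvLe a b) (h2 : pvLe b a) : a = b := by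
  rcases h1 with h1 | ⟨h1, h1'⟩ <;> rcases h2 with h2 | ⟨h2, h2'⟩ <;> omega

-- uniqueness of a pvLe-sorted permutation
theorem pvSorted_unique {l1 l2 : List Int} (hp : l1.Perm l2)
    (h1 : l1.Pairwise pvLe) (h2 : l2.Pairwise pvLe) : l1 = l2 :=
  List.eq_of_perm_of_sorted (fun _ _ _ _ ha hb => pvLe_antisymm ha hb) h1 h2 hp


-- ---------- B side ----------

-- the comparison sorted2 uses, for our composite key
def pvBefore (a b : Int) : Bool :=
  decide (pvDigits a < pvDigits b) || (!decide (pvDigits b < pvDigits a) && decide (a < b))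

theorem pvBefore_false_iff {a b : Int} : pvBefore a b = false ↔ pvLe b a := by
  unfold pvBefore pvLe; simp; omega

theorem pvBefore_true_le {a b : Int} (h : pvBefore a b = true) : pvLe a b := by
  unfold pvBefore at h; unfold pvLe; simp at h; omega

theorem pairwise_insertBy_pvLe (x : Int) (ys : List Int) (h : ys.Pairwise pvLe) :
    (PySem.List.insertBy pvBefore x ys).Pairwise pvLe := by
  induction ys with
  | nil => simp [PySem.List.insertBy]
  | cons y ys ih =>
    rw [PySem.List.insertBy]
    rcases List.pairwise_cons.mp h with ⟨hy, hys⟩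
    by_cases hb : pvBefore x y = true
    · simp only [hb, if_true]
      refine List.pairwise_cons.mpr ⟨?_, h⟩
      intro z hz
      rcases List.mem_cons.mp hz with rfl | hz
      · exact pvBefore_true_le hb
      · exact pvLe_trans (pvBefore_true_le hb) (hy z hz)
    · rw [Bool.not_eq_true] at hb
      simp only [hb, Bool.false_eq_true, if_false]
      refine List.pairwise_cons.mpr ⟨?_, ih hys⟩
      intro z hz
      rcases (PySem.List.insertBy_mem_iff pvBefore x z ys).mp hz with rfl | hz
      · exact pvBefore_false_iff.mp hb
      · exact hy z hz

theorem foldl_insertBy_pairwise (l : List Int) (acc : List Int) (h : acc.Pairwise pvLe) :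
    (l.foldl (fun acc x => PySem.List.insertBy pvBefore x acc) acc).Pairwise pvLe := by
  induction l generalizing acc with
  | nil => exact h
  | cons x l ih => exact ih _ (pairwise_insertBy_pvLe x acc h)

theorem alt_pairwise (numbers : List Int) :
    (sort_by_digit_groups_alt numbers).Pairwise pvLe := by
  have : sort_by_digit_groups_alt numbers =
      numbers.foldl (fun acc x => PySem.List.insertBy pvBefore x acc) [] := rfl
  rw [this]
  exact foldl_insertBy_pairwise numbers [] (by simp)

theorem alt_perm (numbers : List Int) :
    (sort_by_digit_groups_alt numbers).Perm numbers :=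
  PySem.List.sorted2_perm numbers _ _ false

-- ---------- A side ----------

theorem filter_le_lt_perm (pivot : Int) (rest : List Int) :
    (rest.filter (fun x => decide (x ≤ pivot)) ++ rest.filter (fun x => decide (pivot < x))).Perm rest := by
  have hpred : (fun x : Int => decide (pivot < x)) = (fun x => !decide (x ≤ pivot)) := by
    funext x; by_cases h : x ≤ pivot <;> simp [h] <;> omega
  rw [hpred]
  exact List.filter_append_perm _ rest

theorem quicksort_perm (l : List Int) : (pvQuicksort l).Perm l := by
  induction l using pvQuicksort.induct with
  | case1 l h => rw [pvQuicksort]; simp [h]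
  | case2 l h pivot rest hsmall hlarge =>
    rw [pvQuicksort]
    simp only [dif_neg h]
    have hl : rest ++ [pivot] = l :=
      List.dropLast_append_getLast (by intro hn; rw [hn] at h; simp at h)
    have p1 := (hsmall.append (List.Perm.refl [pivot])).append hlarge
    have p2 : (rest.filter (fun x => decide (x ≤ pivot)) ++ [pivot] ++
        rest.filter (fun x => decide (pivot < x))).Perm
        (rest.filter (fun x => decide (x ≤ pivot)) ++
          rest.filter (fun x => decide (pivot < x)) ++ [pivot]) := by
      rw [List.append_assoc, List.append_assoc]
      exact List.Perm.append_left _ List.perm_append_comm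
    have p3 := (filter_le_lt_perm pivot rest).append (List.Perm.refl [pivot])
    exact p1.trans (p2.trans (p3.trans (hl ▸ List.Perm.refl l)))

theorem quicksort_pairwise (l : List Int) : (pvQuicksort l).Pairwise (· ≤ ·) := by
  induction l using pvQuicksort.induct with
  | case1 l h =>
    rw [pvQuicksort]
    simp only [dif_pos h]
    match l, h with
    | [], _ => simp
    | [x], _ => simp
  | case2 l h pivot rest hsmall hlarge =>
    rw [pvQuicksort]
    simp only [dif_neg h]
    rw [List.append_assoc, List.pairwise_append]
    refine ⟨hsmall, ?_, ?_⟩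
    · rw [List.singleton_append, List.pairwise_cons]
      refine ⟨?_, hlarge⟩
      intro y hy
      have := List.of_mem_filter ((quicksort_perm _).mem_iff.mp hy)
      simp at this; omega
    · intro x hx y hy
      have hx' := List.of_mem_filter ((quicksort_perm _).mem_iff.mp hx)
      simp at hx'
      rcases List.mem_append.mp hy with hy | hy
      · rcases List.mem_singleton.mp hy with rfl
        exact hx'
      · have := List.of_mem_filter ((quicksort_perm _).mem_iff.mp hy)
        simp at this; omega

-- the dict-building loop body, with the redundant "insert [] first" collapsed into modify
theorem pvBody_eq (d : PySem.Dict Int (List Int)) (n : Int) :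
    ((if d.contains (pvDigits n) then d else d.insert (pvDigits n) ([] : List Int)).modify
        (pvDigits n) [] (fun g => g ++ [n])) =
      d.modify (pvDigits n) [] (fun g => g ++ [n]) := by
  by_cases hc : d.contains (pvDigits n)
  · simp [hc]
  · rw [Bool.not_eq_true] at hc
    simp only [hc, Bool.false_eq_true, if_false, PySem.Dict.modify,
      PySem.Dict.getD_insert_self, PySem.Dict.insert_insert_self,
      PySem.Dict.getD_of_not_contains d ([] : List Int) hc]

def pvGroups (numbers : List Int) : PySem.Dict Int (List Int) :=
  numbers.foldl (fun d n => d.modify (pvDigits n) [] (fun g => g ++ [n])) PySem.Dict.empty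

theorem pvGroups_eq (numbers : List Int) :
    numbers.foldl (fun d number =>
      let digit_count := pvDigits number
      let d := if d.contains digit_count then d else d.insert digit_count ([] : List Int)
      d.modify digit_count [] (fun g => g ++ [number])) PySem.Dict.empty = pvGroups numbers := by
  unfold pvGroups
  congr 1
  funext d n
  exact pvBody_eq d n

theorem pvGroups_getD (numbers : List Int) (c : Int) :
    (pvGroups numbers).getD c [] = numbers.filter (fun n => pvDigits n == c) := by
  unfold pvGroups
  have hfold : (numbers.map (fun n => (pvDigits n, n))).foldl
      (fun (d : PySem.Dict Int (List Int)) (p : Int × Int) =>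
        d.modify p.1 [] (fun g => g ++ [p.2])) PySem.Dict.empty =
      numbers.foldl (fun d n => d.modify (pvDigits n) [] (fun g => g ++ [n]))
        PySem.Dict.empty := by
    rw [List.foldl_map]
  rw [← hfold, PySem.Dict.getD_foldl_modify_append]
  simp [List.filter_map, Function.comp_def]

theorem pvGroups_keys (numbers : List Int) :
    (pvGroups numbers).keys = PySem.Set.ofList (numbers.map pvDigits) := by
  unfold pvGroups
  rw [PySem.Dict.keys_foldl_modify_key numbers pvDigits [] (fun _ n => fun g => g ++ [n])]
  simp [PySem.Dict.keys_empty, PySem.Set.update_nil_left]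

theorem pvGroups_keys_nodup (numbers : List Int) : (pvGroups numbers).keys.Nodup := by
  rw [pvGroups_keys]
  exact PySem.Set.nodup_ofList _

theorem pvGroups_items (numbers : List Int) :
    (pvGroups numbers).items =
      (pvGroups numbers).keys.map (fun c => (c, numbers.filter (fun n => pvDigits n == c))) := by
  rw [PySem.Dict.items_eq_map_keys _ (pvGroups_keys_nodup numbers) []]
  exact List.map_congr_left (fun c _ => by rw [pvGroups_getD])

-- partition of a list into its fibers under pvDigits, over a Nodup key list
theorem perm_flatten_filter : ∀ (ks : List Int) (l : List Int), ks.Nodup →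
    (∀ n ∈ l, pvDigits n ∈ ks) →
    ((ks.map (fun c => l.filter (fun n => pvDigits n == c))).flatten).Perm l := by
  intro ks
  induction ks with
  | nil =>
    intro l _ hmem
    have : l = [] := List.eq_nil_iff_forall_not_mem.mpr (fun n hn => by simpa using hmem n hn)
    simp [this]
  | cons c ks ih =>
    intro l hnd hmem
    rcases List.nodup_cons.mp hnd with ⟨hc, hnd'⟩
    simp only [List.map_cons, List.flatten_cons]
    have hrest : ∀ c' ∈ ks, l.filter (fun n => pvDigits n == c') =
        (l.filter (fun n => !(pvDigits n == c))).filter (fun n => pvDigits n == c') := by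
      intro c' hc'
      rw [List.filter_filter]
      refine List.filter_congr ?_
      intro n _
      by_cases hd : pvDigits n = c'
      · have hcc : ¬ c' = c := fun he => hc (he ▸ hc')
        simp [hd, hcc]
      · simp [hd]
    rw [List.map_congr_left (fun c' hc' => hrest c' hc')]
    have hmem' : ∀ n ∈ l.filter (fun n => !(pvDigits n == c)), pvDigits n ∈ ks := by
      intro n hn
      rcases List.mem_filter.mp hn with ⟨hnl, hne⟩
      rcases List.mem_cons.mp (hmem n hnl) with h | h
      · simp at hne; exact absurd h hne
      · exact h
    have := (List.Perm.refl (l.filter (fun n => pvDigits n == c))).append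
      (ih (l.filter (fun n => !(pvDigits n == c))) hnd' hmem')
    refine this.trans ?_
    exact List.filter_append_perm _ l

-- the sorted items list, abbreviated
def pvS (numbers : List Int) : List (Int × List Int) :=
  PySem.List.sorted (pvGroups numbers).items (fun p => p.1)

theorem pvA_eq (numbers : List Int) :
    sort_by_digit_groups numbers =
      ((pvS numbers).map (fun p => pvQuicksort p.2)).flatten := by
  have h0 : sort_by_digit_groups numbers =
      (PySem.List.sorted (numbers.foldl (fun d number =>
          let digit_count := pvDigits number
          let d := if d.contains digit_count then d
                   else d.insert digit_count ([] : List Int)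
          d.modify digit_count [] (fun g => g ++ [number])) PySem.Dict.empty).items
        (fun p => p.1)).foldl (fun result p => result ++ pvQuicksort p.2) [] := rfl
  rw [h0, pvGroups_eq]
  rw [PySem.List.foldl_append_eq_flatMap]
  simp only [List.nil_append, List.flatMap_def]
  rfl

theorem flatten_map_qs_perm : ∀ (S : List (Int × List Int)),
    ((S.map (fun p => pvQuicksort p.2)).flatten).Perm ((S.map (fun p => p.2)).flatten) := by
  intro S
  induction S with
  | nil => simp
  | cons p S ih =>
    simp only [List.map_cons, List.flatten_cons]
    exact (quicksort_perm p.2).append ih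

theorem a_perm (numbers : List Int) : (sort_by_digit_groups numbers).Perm numbers := by
  rw [pvA_eq]
  refine (flatten_map_qs_perm (pvS numbers)).trans ?_
  have hS : (pvS numbers).Perm (pvGroups numbers).items := PySem.List.sorted_perm _ _ false
  refine (List.Perm.flatten (hS.map (fun p => p.2))).trans ?_
  rw [pvGroups_items, List.map_map]
  have : ((fun p : Int × List Int => p.2) ∘ fun c => (c, numbers.filter (fun n => pvDigits n == c))) =
      (fun c => numbers.filter (fun n => pvDigits n == c)) := rfl
  rw [this]
  refine perm_flatten_filter _ numbers (pvGroups_keys_nodup numbers) ?_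
  intro n hn
  rw [pvGroups_keys]
  rw [PySem.Set.mem_ofList]
  exact List.mem_map_of_mem hn

theorem pvS_snd (numbers : List Int) {p : Int × List Int} (hp : p ∈ pvS numbers) :
    p.2 = numbers.filter (fun n => pvDigits n == p.1) := by
  have hp' : p ∈ (pvGroups numbers).items :=
    (PySem.List.sorted_perm _ _ false).mem_iff.mp hp
  rw [pvGroups_items] at hp'
  rcases List.mem_map.mp hp' with ⟨c, _, rfl⟩
  rfl

theorem pvS_fst_lt (numbers : List Int) :
    (pvS numbers).Pairwise (fun p q => p.1 < q.1) := by
  have hle : (pvS numbers).Pairwise (fun p q => p.1 ≤ q.1) :=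
    PySem.List.sorted_pairwise _ _
  have hnd : ((pvS numbers).map (fun p => p.1)).Nodup := by
    have hperm : ((pvS numbers).map (fun p => p.1)).Perm
        ((pvGroups numbers).items.map (fun p => p.1)) :=
      (PySem.List.sorted_perm _ _ false).map _
    rw [hperm.nodup_iff, pvGroups_items, List.map_map]
    have hid : ((fun p : Int × List Int => p.1) ∘
        fun c => (c, numbers.filter (fun n => pvDigits n == c))) = id := rfl
    rw [hid, List.map_id]
    exact pvGroups_keys_nodup numbers
  have hne : (pvS numbers).Pairwise (fun p q => p.1 ≠ q.1) :=
    (List.pairwise_map.mp hnd)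
  exact (hle.and hne).imp (fun h => lt_of_le_of_ne h.1 h.2)

theorem a_pairwise (numbers : List Int) : (sort_by_digit_groups numbers).Pairwise pvLe := by
  rw [pvA_eq]
  rw [List.pairwise_flatten]
  constructor
  · intro l hl
    rcases List.mem_map.mp hl with ⟨p, hp, rfl⟩
    have hdig : ∀ x ∈ pvQuicksort p.2, pvDigits x = p.1 := by
      intro x hx
      have hx' : x ∈ p.2 := (quicksort_perm p.2).mem_iff.mp hx
      rw [pvS_snd numbers hp] at hx'
      simpa using (List.mem_filter.mp hx').2
    refine (quicksort_pairwise p.2).imp_of_mem ?_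
    intro a b ha hb hab
    exact Or.inr ⟨by rw [hdig a ha, hdig b hb], hab⟩
  · rw [List.pairwise_map]
    refine (pvS_fst_lt numbers).imp_of_mem ?_
    intro p q hp hq hlt x hx y hy
    have hdx : pvDigits x = p.1 := by
      have hx' : x ∈ p.2 := (quicksort_perm p.2).mem_iff.mp hx
      rw [pvS_snd numbers hp] at hx'
      simpa using (List.mem_filter.mp hx').2
    have hdy : pvDigits y = q.1 := by
      have hy' : y ∈ q.2 := (quicksort_perm q.2).mem_iff.mp hy
      rw [pvS_snd numbers hq] at hy'
      simpa using (List.mem_filter.mp hy').2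
    exact Or.inl (by rw [hdx, hdy]; exact hlt)

-- ===== VERDICT (by name: the statement is the Claim_ definition above) =====
theorem sort_by_digit_groups_spec : Claim_equal_sort_by_digit_groups := by
  intro numbers _
  unfold Spec_sort_by_digit_groups
  exact pvSorted_unique ((a_perm numbers).trans (alt_perm numbers).symm)
    (a_pairwise numbers) (alt_pairwise numbers)
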